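-- pv_equiv track=rewrite | github.com/hongyiheng/lc-base-on-doocs | Sliding Window/2653.Sliding Subarray Beauty/Solution.py | getSubarrayBeauty
-- ===== SOURCE A (Python) =====
-- from typing import List
--
-- def getSubarrayBeauty(nums: List[int], k: int, x: int) -> List[int]:
--     def getXMin():
--         t = x
--         for i, v in enumerate(cnt):
--             if v >= t:
--                 return i - 50 if i <= 50 else 0
--             t -= v
--         return 0
--
--     ans = []
--     l = r = 0
--     cnt = [0] * 110
--     while r < len(nums):
--         cnt[nums[r] + 50] += 1
--         if r - l + 1 == k:
--             ans.append(getXMin())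
--             cnt[nums[l] + 50] -= 1
--             l += 1
--         r += 1
--     return ans
-- ===== SOURCE B (Python) =====
-- from typing import List
--
-- def getSubarrayBeauty(nums: List[int], k: int, x: int) -> List[int]:
--     res = []
--     for i in range(len(nums) - k + 1):
--         v = sorted(nums[i:i + k])[x - 1]
--         res.append(v if v < 0 else 0)
--     return res
-- ===== Notes on version B (the rewrite author's own statement) =====
-- stated objective: simpler
-- what changed: B recomputes each window independently (sort nums[i:i+k], read the x-th smallest) instead of A's incrementally maintained 110-slot sliding count histogram with a per-window linear scan; …
-- outside the precondition, e.g. on getSubarrayBeauty([-60], 1, 1): A returns [0], B returns [-60]; on getSubarrayBeauty([5], 1, 2): A returns [0], B raises IndexError; on getSubarrayBeauty([1], 0, 1): A returns [], B raises IndexError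
import Mathlib
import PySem

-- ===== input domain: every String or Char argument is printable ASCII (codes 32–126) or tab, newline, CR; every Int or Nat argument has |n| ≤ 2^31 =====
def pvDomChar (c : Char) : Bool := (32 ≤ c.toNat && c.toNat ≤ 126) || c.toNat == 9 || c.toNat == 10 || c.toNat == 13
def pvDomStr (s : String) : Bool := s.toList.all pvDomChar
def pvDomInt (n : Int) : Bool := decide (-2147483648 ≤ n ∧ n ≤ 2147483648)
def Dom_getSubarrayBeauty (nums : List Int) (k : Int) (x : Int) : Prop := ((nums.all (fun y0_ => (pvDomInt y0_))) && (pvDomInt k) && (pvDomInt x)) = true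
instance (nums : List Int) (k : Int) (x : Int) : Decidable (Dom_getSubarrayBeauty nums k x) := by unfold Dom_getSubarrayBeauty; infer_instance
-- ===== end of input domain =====

-- B replaces A's incrementally maintained 110-slot sliding count histogram by an independent
-- sort-and-select of each window (simpler; not faster).

-- ===== PORT A =====
-- cnt[idx] += d with Python list-index semantics (negative wrap; none = IndexError, unreachable under Pre_)
def pvBump (cnt : List Int) (idx : Int) (d : Int) : List Int :=
  match PySem.List.pyIdx? cnt.length idx with
  | some n => cnt.set n (cnt.getD n 0 + d)
  | none => cnt

-- 'for i, v in enumerate(cnt): if v >= t: return …; t -= v', with the final 'return 0'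
def pvGetXMinGo (cnt : List Int) (i : Nat) (t : Int) : Int :=
  match cnt with
  | [] => 0
  | v :: rest => if t ≤ v then (if i ≤ 50 then (i : Int) - 50 else 0) else pvGetXMinGo rest (i + 1) (t - v)

def pvGetXMin (cnt : List Int) (x : Int) : Int := pvGetXMinGo cnt 0 x

-- the 'while r < len(nums)' loop: r increments every iteration, so it is the fold of the loop
-- body over r in range(len(nums)) with state (ans, l, cnt); nums[r] and nums[l] are ported as
-- pyGetD (the loop keeps 0 ≤ l ≤ r < len(nums), so the Python indexing never raises)
def pvStep (nums : List Int) (k x : Int) (st : List Int × Int × List Int) (r : Int) :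
    List Int × Int × List Int :=
  let (ans, l, cnt) := st
  let cnt1 := pvBump cnt (PySem.List.pyGetD nums r 0 + 50) 1
  if r - l + 1 = k then
    (ans ++ [pvGetXMin cnt1 x], l + 1, pvBump cnt1 (PySem.List.pyGetD nums l 0 + 50) (-1))
  else (ans, l, cnt1)

def getSubarrayBeauty (nums : List Int) (k : Int) (x : Int) : List Int :=
  ((PySem.List.pyRange 0 (nums.length : Int) 1).foldl (pvStep nums k x)
    ([], 0, List.replicate 110 0)).1

-- ===== PORT B =====
-- sorted(nums[i:i+k])[x-1]; the none branch is Python's IndexError, unreachable when 1 ≤ x ≤ k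
def pvBeauty (nums : List Int) (k x : Int) (i : Int) : Int :=
  match PySem.List.pyGet?
      (PySem.List.sorted (PySem.List.slice nums (some i) (some (i + k))) (fun v => v) false)
      (x - 1) with
  | some v => if v < 0 then v else 0
  | none => 0

def getSubarrayBeauty_alt (nums : List Int) (k : Int) (x : Int) : List Int :=
  (PySem.List.pyRange 0 ((nums.length : Int) - k + 1) 1).map (pvBeauty nums k x)

-- ===== PRECONDITION & SPEC =====
-- Pre_ excludes values outside [-50,59] (beyond them A's cnt indexing raises IndexError, and on
-- [-110,-51] silently wraps via Python negative indexing), k ≤ 0 (B's empty windows raise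
-- IndexError where A returns []), x > k with windows present (B's window indexing raises
-- IndexError while A returns a fallen-through 0 per window), and x ≤ 0 with windows present (the
-- x-th smallest is unspecified there and both values are artefacts: A's histogram scan stops at
-- slot 0 and yields -50 per window, B's Python negative indexing reads from the window's end).
def Pre_getSubarrayBeauty (nums : List Int) (k : Int) (x : Int) : Prop :=
  (∀ v ∈ nums, -50 ≤ v ∧ v ≤ 59) ∧ 1 ≤ k ∧ (k ≤ (nums.length : Int) → 1 ≤ x ∧ x ≤ k)
instance (nums : List Int) (k : Int) (x : Int) : Decidable (Pre_getSubarrayBeauty nums k x) := by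
  unfold Pre_getSubarrayBeauty; infer_instance

def pvWitness_getSubarrayBeauty : List Int × Int × Int := ([-1, 2, 0], 2, 1)

def Spec_getSubarrayBeauty (nums : List Int) (k : Int) (x : Int) (out : List Int) : Prop := out = getSubarrayBeauty_alt nums k x
instance (nums : List Int) (k : Int) (x : Int) (out : List Int) : Decidable (Spec_getSubarrayBeauty nums k x out) := by unfold Spec_getSubarrayBeauty; infer_instance

-- ===== CLAIM (what is proved, stated in full; the proofs are below) =====
def Claim_equal_getSubarrayBeauty : Prop := ∀ (nums : List Int) (k : Int) (x : Int), Dom_getSubarrayBeauty nums k x → Pre_getSubarrayBeauty nums k x → Spec_getSubarrayBeauty nums k x (getSubarrayBeauty nums k x)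

-- ===== LEMMAS AND PROOFS =====

def pvHist (w : List Int) : List Int :=
  (List.range 110).map (fun (i : Nat) => (w.countP (fun v => decide (v = (i : Int) - 50)) : Int))

def pvC (w : List Int) (i : Nat) : Int := (w.countP (fun v => decide (v < (i : Int) - 50)) : Int)

theorem pvHist_nil : pvHist [] = List.replicate 110 0 := by decide

theorem pvC_succ (w : List Int) (i : Nat) :
    pvC w (i + 1) = pvC w i + (w.countP (fun v => decide (v = (i : Int) - 50)) : Int) := by
  unfold pvC
  induction w with
  | nil => simp
  | cons a t ih =>
    simp only [List.countP_cons]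
    push_cast
    push_cast at ih
    by_cases h1 : a < (i : Int) + 1 - 50 <;> by_cases h2 : a < (i : Int) - 50 <;>
      by_cases h3 : a = (i : Int) - 50 <;> simp [h1, h2, h3] <;> omega

theorem pvHist_length (w : List Int) : (pvHist w).length = 110 := by
  unfold pvHist; simp

theorem pvHist_getElem (w : List Int) (j : Nat) (h : j < (pvHist w).length) :
    (pvHist w)[j] = (w.countP (fun v => decide (v = (j : Int) - 50)) : Int) := by
  unfold pvHist at h ⊢
  simp only [List.getElem_map, List.getElem_range]

theorem pvBump_hist_append (w : List Int) (a : Int) (h1 : -50 ≤ a) (h2 : a ≤ 59) :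
    pvBump (pvHist w) (a + 50) 1 = pvHist (w ++ [a]) := by
  have hn : (a + 50).toNat < 110 := by omega
  have hidx : PySem.List.pyIdx? (pvHist w).length (a + 50) = some (a + 50).toNat := by
    rw [pvHist_length]; unfold PySem.List.pyIdx?
    rw [if_pos (by omega), if_pos (by omega)]
  unfold pvBump
  rw [hidx]; dsimp only
  apply List.ext_getElem
  · rw [List.length_set, pvHist_length, pvHist_length]
  · intro j hj hj2
    have hj110 : j < 110 := by rw [List.length_set, pvHist_length] at hj; exact hj
    rw [List.getElem_set, pvHist_getElem _ _ hj2, List.countP_append]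
    by_cases hje : (a + 50).toNat = j
    · obtain rfl := hje
      rw [if_pos rfl]
      have hgd : (pvHist w).getD (a + 50).toNat 0
          = (w.countP (fun v => decide (v = (((a + 50).toNat : Nat) : Int) - 50)) : Int) := by
        rw [List.getD_eq_getElem?_getD,
          List.getElem?_eq_getElem (by rw [pvHist_length]; exact hj110)]
        simp [pvHist_getElem]
      rw [hgd]
      have he : List.countP (fun v => decide (v = (((a + 50).toNat : Nat) : Int) - 50)) [a] = 1 := by
        simp only [List.countP_cons, List.countP_nil]
        rw [decide_eq_true (by omega : a = (((a + 50).toNat : Nat) : Int) - 50)]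
        simp
      rw [he]
      push_cast; omega
    · rw [if_neg hje, pvHist_getElem _ _ (by rw [pvHist_length]; exact hj110)]
      have he : List.countP (fun v => decide (v = ((j : Nat) : Int) - 50)) [a] = 0 := by
        simp only [List.countP_cons, List.countP_nil]
        rw [decide_eq_false (by omega : ¬ a = ((j : Nat) : Int) - 50)]
        simp
      rw [he]
      simp

theorem pvBump_hist_cons (a : Int) (w : List Int) (h1 : -50 ≤ a) (h2 : a ≤ 59) :
    pvBump (pvHist (a :: w)) (a + 50) (-1) = pvHist w := by
  have hn : (a + 50).toNat < 110 := by omega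
  have hidx : PySem.List.pyIdx? (pvHist (a :: w)).length (a + 50) = some (a + 50).toNat := by
    rw [pvHist_length]; unfold PySem.List.pyIdx?
    rw [if_pos (by omega), if_pos (by omega)]
  unfold pvBump
  rw [hidx]; dsimp only
  apply List.ext_getElem
  · rw [List.length_set, pvHist_length, pvHist_length]
  · intro j hj hj2
    have hj110 : j < 110 := by rw [List.length_set, pvHist_length] at hj; exact hj
    rw [List.getElem_set, pvHist_getElem _ _ hj2]
    by_cases hje : (a + 50).toNat = j
    · obtain rfl := hje
      rw [if_pos rfl]
      have hgd : (pvHist (a :: w)).getD (a + 50).toNat 0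
          = ((a :: w).countP (fun v => decide (v = (((a + 50).toNat : Nat) : Int) - 50)) : Int) := by
        rw [List.getD_eq_getElem?_getD,
          List.getElem?_eq_getElem (by rw [pvHist_length]; exact hj110)]
        simp [pvHist_getElem]
      rw [hgd]
      have hc : List.countP (fun v => decide (v = (((a + 50).toNat : Nat) : Int) - 50)) (a :: w)
          = List.countP (fun v => decide (v = (((a + 50).toNat : Nat) : Int) - 50)) w + 1 := by
        rw [List.countP_cons, decide_eq_true (by omega : a = (((a + 50).toNat : Nat) : Int) - 50)]
        simp
      rw [hc]
      push_cast; omega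
    · rw [if_neg hje, pvHist_getElem _ _ (by rw [pvHist_length]; exact hj110), List.countP_cons]
      rw [decide_eq_false (by omega : ¬ a = ((j : Nat) : Int) - 50)]
      simp

theorem pvGetXMinGo_spec (w : List Int) (x : Int) (istar : Nat) (hstar : istar < 110)
    (Hge : x ≤ pvC w (istar + 1)) (Hlt : ∀ j ≤ istar, pvC w j < x) :
    ∀ n i0, i0 ≤ istar → 110 - i0 = n →
      pvGetXMinGo ((List.range' i0 (110 - i0)).map
          (fun (i : Nat) => (w.countP (fun v => decide (v = (i : Int) - 50)) : Int))) i0 (x - pvC w i0)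
        = (if istar ≤ 50 then (istar : Int) - 50 else 0) := by
  intro n
  induction n with
  | zero => intro i0 hi0 hn; omega
  | succ m ih =>
    intro i0 hi0 hn
    have hi0' : i0 < 110 := by omega
    have hrange : 110 - i0 = (110 - (i0 + 1)) + 1 := by omega
    rw [hrange, List.range'_succ, List.map_cons]
    rw [pvGetXMinGo]
    have hsucc := pvC_succ w i0
    by_cases hcase : i0 = istar
    · obtain rfl := hcase
      rw [if_pos (by omega)]
    · have hlt : pvC w (i0 + 1) < x := Hlt (i0 + 1) (by omega)
      rw [if_neg (by omega)]
      have : x - pvC w i0 - (w.countP (fun v => decide (v = (i0 : Int) - 50)) : Int)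
          = x - pvC w (i0 + 1) := by omega
      rw [this]
      exact ih (i0 + 1) (by omega) (by omega)

theorem pvGetXMin_hist (w : List Int) (x : Int)
    (hw : ∀ v ∈ w, -50 ≤ v ∧ v ≤ 59) (hx1 : 1 ≤ x) (hxk : x ≤ (w.length : Int)) :
    pvGetXMin (pvHist w) x
      = (match PySem.List.pyGet? (PySem.List.sorted w (fun v => v) false) (x - 1) with
         | some v => if v < 0 then v else 0
         | none => 0) := by
  set s := PySem.List.sorted w (fun v => v) false with hs
  have hslen : s.length = w.length := PySem.List.length_sorted w _ false
  have hp : (x - 1).toNat < s.length := by omega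
  set p := (x - 1).toNat with hpdef
  set v := s[p] with hv
  have hvw : v ∈ w := by
    rw [← PySem.List.mem_sorted w (fun v => v) false]
    exact List.getElem_mem hp
  have hvb := hw v hvw
  set istar := (v + 50).toNat with histar
  have hvi : (istar : Int) = v + 50 := by omega
  have hperm : s.Perm w := PySem.List.sorted_perm w _ false
  have Hge : x ≤ pvC w (istar + 1) := by
    unfold pvC
    rw [← (hperm.countP_eq (fun u => decide (u < ((istar + 1 : Nat) : Int) - 50)))]
    have htake : ∀ u ∈ s.take (p + 1), decide (u < ((istar + 1 : Nat) : Int) - 50) = true := by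
      intro u hu
      obtain ⟨q, hqlen, hq⟩ := List.getElem_of_mem hu
      have hql : q < min (p + 1) s.length := by simpa [List.length_take] using hqlen
      have hq2 : q < s.length := by omega
      have hu' : u = s[q] := by rw [← hq, List.getElem_take]
      have hle : s[q] ≤ s[p] := PySem.List.sorted_id_getElem_mono w (by omega) hp
      rw [hu']
      simp only [decide_eq_true_eq]
      push_cast
      omega
    have hlen : (s.take (p + 1)).length = p + 1 := by simp [List.length_take]; omega
    have hcount : List.countP (fun u => decide (u < ((istar + 1 : Nat) : Int) - 50)) (s.take (p + 1)) = p + 1 := by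
      rw [List.countP_eq_length.mpr htake, hlen]
    have hsplit : s = s.take (p + 1) ++ s.drop (p + 1) := by simp
    calc x ≤ ((p + 1 : Nat) : Int) := by omega
    _ ≤ _ := by
        conv_rhs => rw [hsplit]
        rw [List.countP_append, hcount]
        push_cast
        omega
  have Hlt : ∀ j ≤ istar, pvC w j < x := by
    intro j hj
    unfold pvC
    rw [← (hperm.countP_eq (fun u => decide (u < ((j : Nat) : Int) - 50)))]
    have hdrop : ∀ u ∈ s.drop p, ¬ (decide (u < ((j : Nat) : Int) - 50) = true) := by
      intro u hu
      obtain ⟨q, hqlen, hq⟩ := List.getElem_of_mem hu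
      have hql : q < s.length - p := by simpa [List.length_drop] using hqlen
      have hpq : p + q < s.length := by omega
      have hu' : u = s[p + q]'hpq := by rw [← hq, List.getElem_drop]
      have hge : s[p] ≤ s[p + q]'hpq := PySem.List.sorted_id_getElem_mono w (by omega) hpq
      rw [hu']
      simp only [decide_eq_true_eq, not_lt]
      omega
    have hsplit : s = s.take p ++ s.drop p := by simp
    have hcnt : List.countP (fun u => decide (u < ((j : Nat) : Int) - 50)) s ≤ p := by
      conv_lhs => rw [hsplit]
      rw [List.countP_append, List.countP_eq_zero.mpr hdrop]
      have h1 := List.countP_le_length (p := fun u => decide (u < ((j : Nat) : Int) - 50)) (l := s.take p)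
      simp [List.length_take] at h1
      omega
    omega
  have hstar110 : istar < 110 := by omega
  have hmain := pvGetXMinGo_spec w x istar hstar110 Hge Hlt 110 0 (Nat.zero_le _) (by omega)
  have hC0 : pvC w 0 = 0 := by
    unfold pvC
    have : ∀ u ∈ w, ¬ (decide (u < ((0 : Nat) : Int) - 50) = true) := by
      intro u hu
      have := hw u hu
      simp only [decide_eq_true_eq, not_lt]
      push_cast
      omega
    rw [List.countP_eq_zero.mpr this]
    simp
  rw [hC0, sub_zero] at hmain
  have hhist : pvHist w = (List.range' 0 (110 - 0)).map
      (fun (i : Nat) => (w.countP (fun v => decide (v = (i : Int) - 50)) : Int)) := by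
    unfold pvHist
    rw [List.range_eq_range']
  unfold pvGetXMin
  rw [hhist, hmain]
  have hget : PySem.List.pyGet? s (x - 1) = some v := by
    have : (x - 1) = ((p : Nat) : Int) := by omega
    rw [this, PySem.List.pyGet?_natCast, List.getElem?_eq_getElem hp]
  rw [hget]
  have hred : (match some v with | some u => if u < 0 then (u : Int) else 0 | none => 0) = if v < 0 then v else 0 := rfl
  rw [hred]
  by_cases hv0 : v < 0
  · rw [if_pos (by omega), if_pos hv0]; omega
  · rw [if_neg hv0]
    by_cases hv00 : v = 0
    · rw [if_pos (by omega)]; omega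
    · rw [if_neg (by omega)]

theorem pvFold_inv (nums : List Int) (k x : Int) (hk : 1 ≤ k) (hx1 : 1 ≤ x) (hxk : x ≤ k)
    (hw : ∀ v ∈ nums, -50 ≤ v ∧ v ≤ 59) :
    ∀ r, r ≤ nums.length →
      (PySem.List.pyRange 0 (r : Int) 1).foldl (pvStep nums k x) ([], 0, List.replicate 110 0)
        = ((List.range (r + 1 - k.toNat)).map (fun (i : Nat) => pvBeauty nums k x (i : Int)),
           ((r + 1 - k.toNat : Nat) : Int),
           pvHist ((nums.drop (r + 1 - k.toNat)).take (r - (r + 1 - k.toNat)))) := by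
  intro r
  induction r with
  | zero =>
    intro _
    rw [PySem.List.pyRange_one_eq_nil (by omega), List.foldl_nil]
    have e : 0 + 1 - k.toNat = 0 := by omega
    rw [e]
    simp [pvHist_nil]
  | succ r ih =>
    intro hr
    have hrlen : r < nums.length := by omega
    have hkn : 1 ≤ k.toNat := by omega
    have hkk : (k.toNat : Int) = k := Int.toNat_of_nonneg (by omega)
    have hab := hw nums[r] (List.getElem_mem hrlen)
    have hlr : r + 1 - k.toNat ≤ r := by omega
    have hcast : ((r + 1 : Nat) : Int) = (r : Int) + 1 := by push_cast; ring
    rw [hcast, PySem.List.pyRange_one_succ_right (by omega), List.foldl_append,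
      List.foldl_cons, List.foldl_nil, ih (by omega)]
    unfold pvStep
    dsimp only
    have hget : PySem.List.pyGetD nums (r : Int) 0 = nums[r] := by
      rw [PySem.List.pyGetD_natCast]
      rw [List.getD_eq_getElem?_getD, List.getElem?_eq_getElem hrlen]
      rfl
    rw [hget]
    -- cnt after the increment is the histogram of the window extended by nums[r]
    have hcnt1 : pvBump (pvHist ((nums.drop (r + 1 - k.toNat)).take (r - (r + 1 - k.toNat)))) (nums[r] + 50) 1
        = pvHist ((nums.drop (r + 1 - k.toNat)).take (r - (r + 1 - k.toNat) + 1)) := by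
      rw [pvBump_hist_append _ _ hab.1 hab.2]
      congr 1
      rw [List.take_add_one]
      congr 1
      rw [List.getElem?_drop]
      have e : r + 1 - k.toNat + (r - (r + 1 - k.toNat)) = r := by omega
      rw [e, List.getElem?_eq_getElem hrlen]
      rfl
    rw [hcnt1]
    by_cases hcase : k.toNat ≤ r + 1
    · have hcond : ((r : Int) - ((r + 1 - k.toNat : Nat) : Int) + 1 = k) := by omega
      rw [if_pos hcond]
      set l := r + 1 - k.toNat with hl
      have hwin : r - l + 1 = k.toNat := by omega
      have hlen2 : l + k.toNat ≤ nums.length := by omega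
      have hW : ((nums.drop l).take (r - l + 1)) = (nums.drop l).take k.toNat := by rw [hwin]
      have hWlen : ((nums.drop l).take k.toNat).length = k.toNat := by
        simp [List.length_take, List.length_drop]; omega
      have hWmem : ∀ v ∈ (nums.drop l).take k.toNat, -50 ≤ v ∧ v ≤ 59 := by
        intro v hv
        exact hw v (List.mem_of_mem_drop (List.mem_of_mem_take hv))
      -- the appended value is B's beauty of window l
      have hxmin : pvGetXMin (pvHist ((nums.drop l).take (r - l + 1))) x = pvBeauty nums k x (l : Int) := by
        rw [hW, pvGetXMin_hist _ x hWmem hx1 (by rw [hWlen]; omega)]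
        unfold pvBeauty
        have hslice : PySem.List.slice nums (some (l : Int)) (some ((l : Int) + k))
            = (nums.drop l).take k.toNat := by
          have e : (l : Int) + k = ((l + k.toNat : Nat) : Int) := by omega
          rw [e, PySem.List.slice_natCast]
          congr 1
          omega
        rw [hslice]
      rw [hxmin]
      -- the decrement removes nums[l], the head of the window
      have hgd : PySem.List.pyGetD nums ((l : Nat) : Int) 0 = nums[l] := by
        rw [PySem.List.pyGetD_natCast]
        rw [List.getD_eq_getElem?_getD, List.getElem?_eq_getElem (by omega)]
        rfl
      have hhead : (nums.drop l).take (r - l + 1) = nums[l] :: (nums.drop (l + 1)).take (k.toNat - 1) := by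
        rw [hW, List.drop_eq_getElem_cons (by omega : l < nums.length)]
        have e : k.toNat = (k.toNat - 1) + 1 := by omega
        conv_lhs => rw [e]
        rw [List.take_succ_cons]
      have hcnt2 : pvBump (pvHist ((nums.drop l).take (r - l + 1))) (PySem.List.pyGetD nums ((l : Nat) : Int) 0 + 50) (-1)
          = pvHist ((nums.drop (l + 1)).take (k.toNat - 1)) := by
        rw [hgd, hhead]
        exact pvBump_hist_cons _ _ (hw nums[l] (List.getElem_mem (by omega))).1
          (hw nums[l] (List.getElem_mem (by omega))).2
      rw [hcnt2]
      -- fold the appended answer into the longer range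
      have hans : (List.range l).map (fun (i : Nat) => pvBeauty nums k x (i : Int)) ++ [pvBeauty nums k x (l : Int)]
          = (List.range (l + 1)).map (fun (i : Nat) => pvBeauty nums k x (i : Int)) := by
        rw [List.range_succ, List.map_append, List.map_singleton]
      rw [hans]
      have e1 : l + 1 = (r + 1) + 1 - k.toNat := by omega
      have e2 : k.toNat - 1 = (r + 1) - ((r + 1) + 1 - k.toNat) := by omega
      have e3 : ((l : Nat) : Int) + 1 = (((r + 1) + 1 - k.toNat : Nat) : Int) := by omega
      rw [e3]
      conv_lhs => rw [e1, e2]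
    · have hcond : ¬ ((r : Int) - ((r + 1 - k.toNat : Nat) : Int) + 1 = k) := by omega
      rw [if_neg hcond]
      have e0 : r + 1 - k.toNat = 0 := by omega
      have e1 : (r + 1) + 1 - k.toNat = 0 := by omega
      rw [e0, e1]
      simp

-- when k > len(nums) the window never reaches size k: the loop keeps ans = [] and l = 0
theorem pvFold_nowin (nums : List Int) (k x : Int) (hlt : (nums.length : Int) < k) :
    ∀ r, r ≤ nums.length →
      ((PySem.List.pyRange 0 (r : Int) 1).foldl (pvStep nums k x) ([], 0, List.replicate 110 0)).1 = []
      ∧ ((PySem.List.pyRange 0 (r : Int) 1).foldl (pvStep nums k x) ([], 0, List.replicate 110 0)).2.1 = 0 := by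
  intro r
  induction r with
  | zero =>
    intro _
    rw [PySem.List.pyRange_one_eq_nil (by omega), List.foldl_nil]
    exact ⟨rfl, rfl⟩
  | succ r ih =>
    intro hr
    obtain ⟨h1, h2⟩ := ih (by omega)
    have hcast : ((r + 1 : Nat) : Int) = (r : Int) + 1 := by push_cast; ring
    rw [hcast, PySem.List.pyRange_one_succ_right (by omega), List.foldl_append,
      List.foldl_cons, List.foldl_nil]
    rcases hst : (PySem.List.pyRange 0 (r : Int) 1).foldl (pvStep nums k x) ([], 0, List.replicate 110 0)
      with ⟨ans, l, cnt⟩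
    rw [hst] at h1 h2
    simp only at h1 h2
    subst h1; subst h2
    unfold pvStep
    dsimp only
    rw [if_neg (by omega)]
    exact ⟨rfl, rfl⟩

-- A = B when 1 ≤ x ≤ k and all values are in range (the main case)
theorem pvMainEq (nums : List Int) (k x : Int) (hx1 : 1 ≤ x) (hxk : x ≤ k)
    (hw : ∀ v ∈ nums, -50 ≤ v ∧ v ≤ 59) :
    getSubarrayBeauty nums k x = getSubarrayBeauty_alt nums k x := by
  have hk : 1 ≤ k := le_trans hx1 hxk
  unfold getSubarrayBeauty getSubarrayBeauty_alt
  rw [pvFold_inv nums k x hk hx1 hxk hw nums.length (le_refl _)]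
  rw [PySem.List.pyRange_one, List.map_map]
  have e3 : ((nums.length : Int) - k + 1 - 0).toNat = nums.length + 1 - k.toNat := by omega
  rw [e3]
  apply List.map_congr_left
  intro i _
  simp [Function.comp]

-- ===== VERDICT (by name: the statement is the Claim_ definition above) =====
theorem getSubarrayBeauty_spec : Claim_equal_getSubarrayBeauty := by
  intro nums k x _hdom hpre
  unfold Spec_getSubarrayBeauty
  obtain ⟨hw, hk, hxr⟩ := hpre
  by_cases hklen : k ≤ (nums.length : Int)
  · obtain ⟨hx1, hxk⟩ := hxr hklen
    exact pvMainEq nums k x hx1 hxk hw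
  · unfold getSubarrayBeauty getSubarrayBeauty_alt
    rw [(pvFold_nowin nums k x (by omega) nums.length (le_refl _)).1,
      PySem.List.pyRange_one_eq_nil (by omega), List.map_nil]
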